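-- pv_equiv track=rewrite | github.com/Tod2a/ExercicesMathExamen | ExoPdf1/Exercice8.py | AddEachCols
-- ===== SOURCE A (Python) =====
-- def AddEachCols(grid):
--     newgrid = []
--     row = []
--     for j in range(len(grid[0])):
--         count = 0
--         for i in range(len(grid)):
--             count += grid[i][j]
--         row.append(count)
--     newgrid.append(row)
--     return newgrid
-- ===== SOURCE B (Python) =====
-- def AddEachCols(grid):
--     totals = [0] * len(grid[0])
--     for row in grid:
--         totals = [t + x for t, x in zip(totals, row)]
--     return [totals]
-- ===== Notes on version B (the rewrite author's own statement) =====
-- stated objective: alternative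
-- what changed: Replaces A's column-major nested index loops (one full pass over the grid per column) with a single row-major pass maintaining a running totals vector updated by zipping each row into it.
import Mathlib
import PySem

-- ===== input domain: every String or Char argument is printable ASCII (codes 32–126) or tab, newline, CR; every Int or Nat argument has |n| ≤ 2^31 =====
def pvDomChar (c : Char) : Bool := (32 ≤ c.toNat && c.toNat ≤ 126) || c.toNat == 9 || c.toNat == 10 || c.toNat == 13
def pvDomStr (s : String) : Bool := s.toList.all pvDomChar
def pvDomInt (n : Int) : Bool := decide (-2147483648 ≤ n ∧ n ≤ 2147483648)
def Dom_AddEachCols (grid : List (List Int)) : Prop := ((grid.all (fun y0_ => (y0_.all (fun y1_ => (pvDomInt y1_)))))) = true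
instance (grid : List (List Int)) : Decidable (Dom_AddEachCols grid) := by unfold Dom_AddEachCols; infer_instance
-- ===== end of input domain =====

-- B replaces A's column-major nested index loops with a single row-major pass
-- maintaining a running totals vector (zip-add each row into it): alternative decomposition.

-- ===== PORT A =====
def AddEachCols (grid : List (List Int)) : List (List Int) :=
  let newgrid : List (List Int) := []
  let row : List Int :=
    (PySem.List.pyRange 0 ((PySem.List.pyGetD grid 0 []).length : Int) 1).foldl
      (fun row j =>
        let count : Int :=
          (PySem.List.pyRange 0 (grid.length : Int) 1).foldl
            (fun count i => count + PySem.List.pyGetD (PySem.List.pyGetD grid i []) j 0) 0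
        row ++ [count]) []
  newgrid ++ [row]

-- ===== PORT B =====
def AddEachCols_alt (grid : List (List Int)) : List (List Int) :=
  let totals0 : List Int := List.replicate (PySem.List.pyGetD grid 0 []).length (0 : Int)
  let totals := grid.foldl (fun t r => (t.zip r).map (fun p => p.1 + p.2)) totals0
  [totals]

-- ===== PRECONDITION & SPEC =====
-- Pre_ excludes exactly the inputs where A raises IndexError: the empty grid
-- (grid[0] fails) and ragged grids where some row is shorter than the first row.
def Pre_AddEachCols (grid : List (List Int)) : Prop :=
  grid ≠ [] ∧ ∀ r ∈ grid, (grid.headD []).length ≤ r.length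
instance (grid : List (List Int)) : Decidable (Pre_AddEachCols grid) := by
  unfold Pre_AddEachCols; infer_instance
def pvWitness_AddEachCols : List (List Int) := [[1, 2, 3], [4, 5, 6]]

def Spec_AddEachCols (grid : List (List Int)) (out : List (List Int)) : Prop := out = AddEachCols_alt grid
instance (grid : List (List Int)) (out : List (List Int)) : Decidable (Spec_AddEachCols grid out) := by unfold Spec_AddEachCols; infer_instance

-- ===== CLAIM (what is proved, stated in full; the proofs are below) =====
def Claim_equal_AddEachCols : Prop := ∀ (grid : List (List Int)), Dom_AddEachCols grid → Pre_AddEachCols grid → Spec_AddEachCols grid (AddEachCols grid)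

-- ===== LEMMAS AND PROOFS =====

-- B's fold characterised: zip-adding every row of g into t yields, at index j,
-- t[j] plus the column-j sum, provided every row is at least as long as t.
theorem zipFold_char (g : List (List Int)) :
    ∀ (t : List Int), (∀ r ∈ g, t.length ≤ r.length) →
    g.foldl (fun t r => (t.zip r).map (fun p => p.1 + p.2)) t
      = (List.range t.length).map
          (fun j => g.foldl (fun c r => c + r.getD j 0) (t.getD j 0)) := by
  induction g with
  | nil =>
    intro t _
    simp only [List.foldl_nil]
    apply List.ext_getElem
    · simp
    · intro j h1 h2
      simp only [List.getElem_map, List.getElem_range]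
      exact (List.getD_eq_getElem _ _ h1).symm
  | cons r g ih =>
    intro t hlen
    have hr : t.length ≤ r.length := hlen r (by simp)
    have hlen' : ((t.zip r).map (fun p : Int × Int => p.1 + p.2)).length = t.length := by
      simp [Nat.min_eq_left hr]
    simp only [List.foldl_cons]
    rw [ih _ (by intro r' hr'; rw [hlen']; exact hlen r' (by simp [hr']))]
    rw [hlen']
    apply List.map_congr_left
    intro j hj
    simp only [List.mem_range] at hj
    congr 1
    have hjr : j < r.length := lt_of_lt_of_le hj hr
    rw [List.getD_eq_getElem _ _ (by simp [Nat.min_eq_left hr, hj]),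
        List.getD_eq_getElem _ _ hj, List.getD_eq_getElem _ _ hjr]
    simp

-- ===== VERDICT (by name: the statement is the Claim_ definition above) =====
theorem AddEachCols_spec : Claim_equal_AddEachCols := by
  intro grid _ hpre
  obtain ⟨hne, hlen⟩ := hpre
  unfold Spec_AddEachCols AddEachCols AddEachCols_alt
  obtain ⟨r0, rest, rfl⟩ : ∃ r0 rest, grid = r0 :: rest :=
    match grid, hne with | r0 :: rest, _ => ⟨r0, rest, rfl⟩
  simp only [List.headD_cons] at hlen
  simp only [PySem.List.pyGetD_zero_cons, List.nil_append]
  -- inner loop of A: fold over range(len(grid)) of grid[i][j] = fold over grid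
  have hinner : ∀ j : Int,
      (PySem.List.pyRange 0 ((r0 :: rest).length : Int) 1).foldl
        (fun count i => count + PySem.List.pyGetD (PySem.List.pyGetD (r0 :: rest) i []) j 0) 0
      = (r0 :: rest).foldl (fun c r => c + PySem.List.pyGetD r j 0) 0 := by
    intro j
    exact PySem.List.foldl_pyRange_zero_pyGetD (r0 :: rest) []
      (fun c r => c + PySem.List.pyGetD r j 0) 0
  congr 1
  -- outer loop of A: append-singleton fold = map over the range
  have houter := PySem.List.foldl_congr_mem
      (l := PySem.List.pyRange 0 (r0.length : Int) 1)
      (f := fun row j =>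
        row ++
          [(PySem.List.pyRange 0 ((r0 :: rest).length : Int) 1).foldl
            (fun count i => count + PySem.List.pyGetD (PySem.List.pyGetD (r0 :: rest) i []) j 0) 0])
      (g := fun row j =>
        row ++ [(r0 :: rest).foldl (fun c r => c + PySem.List.pyGetD r j 0) 0])
      (init := [])
      (by intro acc j hj; dsimp only; rw [hinner j])
  rw [houter]
  rw [PySem.List.foldl_append_singleton_eq_map]
  rw [zipFold_char _ _ (by intro r hr; simpa using hlen r hr)]
  rw [List.length_replicate, PySem.List.pyRange_zero_nat]
  rw [List.map_map]
  apply List.map_congr_left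
  intro j hj
  simp only [List.mem_range] at hj
  simp only [Function.comp_apply]
  have hrep : (List.replicate r0.length (0 : Int)).getD j 0 = 0 := by
    rw [List.getD_eq_getElem _ _ (by simpa using hj)]; simp
  rw [hrep]
  apply PySem.List.foldl_congr_mem
  intro c r _
  rw [PySem.List.pyGetD_natCast]
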